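-- pv_equiv track=rewrite | github.com/trongnhanbro/atbmtt | bo_sung2.py | xen
-- ===== SOURCE A (Python) =====
-- string = "qwertyuiopasdfghjklzxcvbnm"
--
-- def xen(a, b):
--     check = ""
--     result = ""
--     for i in range(0, len(b)):
--         if i == len(b) - 1:
--             result += b[i]
--             break
--         result += b[i]
--         if i <= len(a) - 1:
--             result += a[i]
--         else:
--             for e in string:
--                 if e not in a and e not in check:
--                     result += e
--                     check += e
--                     break
--     return result
-- ===== SOURCE B (Python) =====
-- string = "qwertyuiopasdfghjklzxcvbnm"
--
-- def xen(a, b):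
--     if not b:
--         return ""
--     pool = [c for c in string if c not in a]
--     partner = list(a) + pool
--     out = []
--     for i in range(len(b) - 1):
--         out.append(b[i])
--         if i < len(partner):
--             out.append(partner[i])
--     out.append(b[-1])
--     return "".join(out)
-- ===== Notes on version B (the rewrite author's own statement) =====
-- stated objective: simpler
-- what changed: B precomputes the filler pool (letters of `string` not in a) once and builds a single combined partner table list(a)+pool, then does one uniform interleave pass over b, replacing A's per-position rescan of `string` with the growing `check` string and its a-vs-filler branch.
import Mathlib
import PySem

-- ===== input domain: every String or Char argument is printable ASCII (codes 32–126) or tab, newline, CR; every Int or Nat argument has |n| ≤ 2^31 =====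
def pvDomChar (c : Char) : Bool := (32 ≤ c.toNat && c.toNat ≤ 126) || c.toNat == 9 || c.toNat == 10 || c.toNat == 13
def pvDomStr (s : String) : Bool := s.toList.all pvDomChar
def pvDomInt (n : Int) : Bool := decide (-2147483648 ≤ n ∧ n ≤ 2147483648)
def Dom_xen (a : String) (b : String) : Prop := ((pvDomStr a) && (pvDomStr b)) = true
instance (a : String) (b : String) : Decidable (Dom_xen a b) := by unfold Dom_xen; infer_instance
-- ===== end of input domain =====

-- B replaces A's per-position rescan of `string` (with the growing `check` accumulator and
-- the a-vs-filler branch) by one precomputed partner table list(a)+pool and a single uniform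
-- interleave pass; objective: simpler.

-- ===== PORT A =====
-- the module-level constant `string`
def xenString : List Char := "qwertyuiopasdfghjklzxcvbnm".toList

-- A's inner `for e in string` loop with `break`: first e with e not in a and not in check
def xenFind (aL check : List Char) : List Char → Option Char
  | [] => none
  | e :: rest => if e ∉ aL ∧ e ∉ check then some e else xenFind aL check rest

-- one iteration of A's main loop; state = (check, result); the Python `break` fires only at
-- i = len(b)-1, the last index, so the loop body with no further iterations is exact.
-- `i <= len(a) - 1` is Python int arithmetic, hence ported over Int.
def xenStep (aL bL : List Char) (st : List Char × List Char) (i : Nat) : List Char × List Char :=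
  if i = bL.length - 1 then (st.1, st.2 ++ [bL.getD i ' '])
  else
    let r := st.2 ++ [bL.getD i ' ']
    if (i : Int) ≤ (aL.length : Int) - 1 then (st.1, r ++ [aL.getD i ' '])
    else
      match xenFind aL st.1 xenString with
      | some e => (st.1 ++ [e], r ++ [e])
      | none => (st.1, r)

def xen (a : String) (b : String) : String :=
  String.mk ((List.range b.toList.length).foldl (xenStep a.toList b.toList) ([], [])).2

-- ===== PORT B =====
def xen_alt (a : String) (b : String) : String :=
  let bL := b.toList
  if bL.isEmpty then ""
  else
    let pool := xenString.filter (fun c => decide (c ∉ a.toList))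
    let partner := a.toList ++ pool
    let body := (List.range (bL.length - 1)).foldl
      (fun acc i => acc ++ [bL.getD i ' '] ++
        (if i < partner.length then [partner.getD i ' '] else [])) []
    String.mk (body ++ [bL.getLastD ' '])

-- ===== PRECONDITION & SPEC =====
def Spec_xen (a : String) (b : String) (out : String) : Prop := out = xen_alt a b
instance (a : String) (b : String) (out : String) : Decidable (Spec_xen a b out) := by unfold Spec_xen; infer_instance

-- ===== CLAIM (what is proved, stated in full; the proofs are below) =====
def Claim_equal_xen : Prop := ∀ (a : String) (b : String), Dom_xen a b → Spec_xen a b (xen a b)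

-- ===== LEMMAS AND PROOFS =====

-- a check entry that never occurs in the scanned list is invisible to xenFind
theorem xenFind_cons_notmem (aL check : List Char) (x : Char) (L : List Char)
    (hx : x ∉ L) : xenFind aL (x :: check) L = xenFind aL check L := by
  induction L with
  | nil => rfl
  | cons e rest ih =>
    simp only [List.mem_cons, not_or] at hx
    have hne : e ≠ x := fun h => hx.1 h.symm
    simp only [xenFind, List.mem_cons]
    by_cases he : e ∉ aL ∧ ¬(e = x ∨ e ∈ check)
    · rw [if_pos he, if_pos ⟨he.1, (not_or.mp he.2).2⟩]
    · have : ¬(e ∉ aL ∧ e ∉ check) := by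
        intro ⟨h1, h2⟩; exact he ⟨h1, by simp [hne, h2]⟩
      rw [if_neg he, if_neg this, ih hx.2]

-- when check is exactly the first m used fillers, A's rescan finds the (m+1)-st filler
theorem xenFind_take (aL : List Char) (L : List Char) (hN : L.Nodup) (m : Nat) :
    xenFind aL ((L.filter (fun c => decide (c ∉ aL))).take m) L
      = (L.filter (fun c => decide (c ∉ aL)))[m]? := by
  induction L generalizing m with
  | nil => simp [xenFind]
  | cons e rest ih =>
    rcases List.nodup_cons.mp hN with ⟨heR, hRest⟩
    by_cases he : e ∉ aL
    · rw [List.filter_cons_of_pos (by simpa using he)]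
      cases m with
      | zero =>
        simp [xenFind, he]
      | succ m =>
        simp only [List.take_succ_cons, xenFind]
        rw [if_neg (by simp)]
        rw [xenFind_cons_notmem _ _ _ _ heR, ih hRest]
        simp
    · rw [List.filter_cons_of_neg (by simpa using he)]
      simp only [xenFind]
      rw [if_neg (by tauto), ih hRest]

theorem xenString_nodup : xenString.Nodup := by decide

-- loop invariant: after the first k (non-final) iterations, check = first (k - |a|) fillers
-- and result is B's uniform interleave of the first k characters of b with the partner table
theorem xen_inv (aL bL : List Char) (k : Nat) (hk : k + 1 ≤ bL.length) :
    (List.range k).foldl (xenStep aL bL) ([], []) =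
      ((xenString.filter (fun c => decide (c ∉ aL))).take (k - aL.length),
       (List.range k).foldl
         (fun acc i => acc ++ [bL.getD i ' '] ++
           (if i < (aL ++ xenString.filter (fun c => decide (c ∉ aL))).length
            then [(aL ++ xenString.filter (fun c => decide (c ∉ aL))).getD i ' '] else [])) []) := by
  induction k with
  | zero => simp
  | succ k ih =>
    have hk' : k + 1 ≤ bL.length := by omega
    rw [List.range_succ, List.foldl_append, List.foldl_append, ih hk',
        List.foldl_cons, List.foldl_cons, List.foldl_nil, List.foldl_nil]
    set pool := xenString.filter (fun c => decide (c ∉ aL)) with hpool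
    have hklt : k ≠ bL.length - 1 := by omega
    unfold xenStep
    rw [if_neg hklt]
    by_cases hka : k < aL.length
    · rw [if_pos (by omega)]
      have h1 : k - aL.length = 0 := by omega
      have h2 : k + 1 - aL.length = 0 := by omega
      have h3 : k < (aL ++ pool).length := by simp; omega
      rw [if_pos h3]
      have h4 : (aL ++ pool).getD k ' ' = aL.getD k ' ' := by
        simp [List.getD_eq_getElem?_getD, List.getElem?_append_left hka]
      simp [h1, h2]
      rw [List.getElem?_append_left hka]
    · rw [if_neg (by omega)]
      have hfind := xenFind_take aL xenString xenString_nodup (k - aL.length)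
      by_cases hm : k - aL.length < pool.length
      · have hsome : pool[k - aL.length]? = some (pool.getD (k - aL.length) ' ') := by
          simp [List.getD_eq_getElem?_getD, List.getElem?_eq_getElem hm]
        rw [← hpool] at hfind
        rw [hfind, hsome]
        have h3 : k < (aL ++ pool).length := by simp; omega
        rw [if_pos h3]
        have h4 : (aL ++ pool).getD k ' ' = pool.getD (k - aL.length) ' ' := by
          simp [List.getD_eq_getElem?_getD, List.getElem?_append_right (by omega : aL.length ≤ k)]
        have h5 : pool.take (k - aL.length) ++ [pool.getD (k - aL.length) ' '] =
            pool.take (k + 1 - aL.length) := by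
          have : k + 1 - aL.length = (k - aL.length) + 1 := by omega
          rw [this, List.take_succ, hsome]
          simp
        have h6 : (aL ++ pool)[k]?.getD ' ' = pool[k - aL.length]?.getD ' ' := by
          rw [List.getElem?_append_right (by omega : aL.length ≤ k)]
        rw [Prod.mk.injEq]
        refine ⟨?_, ?_⟩
        · simpa using h5
        · rw [List.append_cancel_left_eq, List.cons.injEq]
          exact ⟨h6.symm, rfl⟩
      · have hnone : pool[k - aL.length]? = none := by
          simp [List.getElem?_eq_none (by omega : pool.length ≤ k - aL.length)]
        rw [← hpool] at hfind
        rw [hfind, hnone]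
        have h3 : ¬ k < (aL ++ pool).length := by simp; omega
        rw [if_neg h3]
        have h5 : pool.take (k - aL.length) = pool.take (k + 1 - aL.length) := by
          rw [List.take_of_length_le (by omega), List.take_of_length_le (by omega)]
        simp [h5]

theorem range_eq_append (n : Nat) (h : 1 ≤ n) : List.range n = List.range (n - 1) ++ [n - 1] := by
  conv_lhs => rw [show n = (n - 1) + 1 by omega]
  rw [List.range_succ]

theorem getLastD_eq_getD (l : List Char) (d : Char) :
    l.getLastD d = l.getD (l.length - 1) d := by
  rw [List.getLastD_eq_getLast?, List.getLast?_eq_getElem?, List.getD_eq_getElem?_getD]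

-- ===== VERDICT (by name: the statement is the Claim_ definition above) =====
theorem xen_spec : Claim_equal_xen := by
  intro a b _
  unfold Spec_xen xen xen_alt
  cases hb : b.toList with
  | nil => rfl
  | cons c0 rest =>
    simp only [List.isEmpty_cons, Bool.false_eq_true, if_false]
    rw [range_eq_append _ (by simp), List.foldl_append, List.foldl_cons, List.foldl_nil,
        xen_inv a.toList (c0 :: rest) ((c0 :: rest).length - 1) (by simp)]
    unfold xenStep
    rw [if_pos rfl, getLastD_eq_getD]
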